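-- pv_equiv track=rewrite | github.com/MattTitmas/AdventOfCode | 2019/Day4/Solution.py | repeated_two
-- ===== SOURCE A (Python) =====
-- def repeated_two(to_check: str):
--     current = to_check[0]
--     count = 1
--     for i in to_check[1:]:
--         if i != current:
--             if count == 2:
--                 return True
--             current = i
--             count = 1
--         else:
--             count += 1
--
--     return count == 2
-- ===== SOURCE B (Python) =====
-- def repeated_two(to_check: str):
--     t = [None, *to_check, None]
--     return any(p != a and a == b and b != q
--                for p, a, b, q in zip(t, t[1:], t[2:], t[3:]))
-- ===== Notes on version B (the rewrite author's own statement) =====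
-- stated objective: alternative
-- what changed: Replaces A's current/count state machine with early return by a stateless single scan of padded 4-character windows (zip of shifted lists): a run of length exactly 2 exists iff some window has p!=a, a==b, b!=q.
import Mathlib
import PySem

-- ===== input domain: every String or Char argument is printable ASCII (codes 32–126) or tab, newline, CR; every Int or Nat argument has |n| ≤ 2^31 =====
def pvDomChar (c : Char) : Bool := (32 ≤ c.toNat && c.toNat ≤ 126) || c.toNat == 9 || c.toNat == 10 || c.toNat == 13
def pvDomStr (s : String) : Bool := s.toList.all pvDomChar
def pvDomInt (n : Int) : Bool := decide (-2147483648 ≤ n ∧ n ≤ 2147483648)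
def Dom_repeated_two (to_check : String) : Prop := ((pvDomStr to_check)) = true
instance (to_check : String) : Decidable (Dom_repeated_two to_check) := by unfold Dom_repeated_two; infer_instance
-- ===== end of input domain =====

-- B replaces A's current/count state machine by a stateless scan of padded 4-char windows (alternative decomposition, same O(n) cost); equality of the RETURN values is what is proved.

-- ===== PORT A =====
-- A's for-loop with early return; count only takes values 1,2,3,… so Nat is exact here.
def pvLoopA (current : Char) (count : Nat) : List Char → Bool
  | [] => count == 2
  | i :: rest =>
    if i ≠ current then
      if count == 2 then true
      else pvLoopA i 1 rest
    else pvLoopA current (count + 1) rest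

def repeated_two (to_check : String) : Bool :=
  match to_check.toList with
  | [] => false   -- unreachable under Pre_: Python raises IndexError at to_check[0]
  | c :: rest => pvLoopA c 1 rest

-- ===== PORT B =====
-- 'any(p != a and a == b and b != q for p,a,b,q in zip(t, t[1:], t[2:], t[3:]))': scan 4-element windows of t.
def pvW : List (Option Char) → Bool
  | p :: a :: b :: q :: rest =>
      (decide (p ≠ a) && (a == b) && decide (b ≠ q)) || pvW (a :: b :: q :: rest)
  | _ => false

def repeated_two_alt (to_check : String) : Bool :=
  pvW (none :: to_check.toList.map some ++ [none])

-- ===== PRECONDITION & SPEC =====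
-- Pre_ excludes only the empty string, on which A raises IndexError.
def Pre_repeated_two (to_check : String) : Prop := to_check ≠ ""
instance (to_check : String) : Decidable (Pre_repeated_two to_check) := by unfold Pre_repeated_two; infer_instance
def pvWitness_repeated_two : String := "aab"

def Spec_repeated_two (to_check : String) (out : Bool) : Prop := out = repeated_two_alt to_check
instance (to_check : String) (out : Bool) : Decidable (Spec_repeated_two to_check out) := by unfold Spec_repeated_two; infer_instance

-- ===== CLAIM (what is proved, stated in full; the proofs are below) =====
def Claim_equal_repeated_two : Prop := ∀ (to_check : String), Dom_repeated_two to_check → Pre_repeated_two to_check → Spec_repeated_two to_check (repeated_two to_check)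

-- ===== LEMMAS AND PROOFS =====

-- run-length-encoding intermediate spec shared by both directions
def pvRuns (c : Char) (k : Nat) : List Char → List (Char × Nat)
  | [] => [(c, k)]
  | x :: xs => if x = c then pvRuns c (k + 1) xs else (c, k) :: pvRuns x 1 xs

theorem pvLoopA_eq_runs (rest : List Char) : ∀ (c : Char) (k : Nat),
    pvLoopA c k rest = (pvRuns c k rest).any (fun p => p.2 == 2) := by
  induction rest with
  | nil => intro c k; simp [pvLoopA, pvRuns]
  | cons x xs ih =>
    intro c k
    by_cases hx : x = c
    · simp [pvLoopA, pvRuns, hx, ih]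
    · by_cases hk : k = 2
      · simp [pvLoopA, pvRuns, hx, hk]
      · simp [pvLoopA, pvRuns, hx, hk, ih]

-- an adjacent duplicate at the head is invisible to pvW (its window has p = a)
theorem pvW_dup (a : Option Char) (rest : List (Option Char)) :
    pvW (a :: a :: rest) = pvW (a :: rest) := by
  match rest with
  | [] => simp [pvW]
  | [b] => simp [pvW]
  | b :: q :: t => simp [pvW]

-- extra copies of the run character collapse
theorem pvW_absorb (c : Option Char) (l : List (Option Char)) :
    ∀ (m : Nat), pvW (c :: List.replicate m c ++ l) = pvW (c :: l) := by
  intro m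
  induction m with
  | zero => simp
  | succ n ih =>
    rw [List.replicate_succ]
    simpa [pvW_dup] using ih

-- peel one maximal run off the front of the padded list
theorem pvW_peel (p : Option Char) (c : Char) (hp : p ≠ some c) (z : Option Char)
    (hz : z ≠ some c) (zs : List (Option Char)) : ∀ (k : Nat),
    pvW (p :: List.replicate (k + 1) (some c) ++ z :: zs)
      = ((k + 1 == 2) || pvW (some c :: z :: zs)) := by
  intro k
  have hz' : some c ≠ z := Ne.symm hz
  match k with
  | 0 =>
    cases zs with
    | nil => simp [List.replicate, pvW]
    | cons w ws => simp [List.replicate, pvW, hz']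
  | 1 => simp [List.replicate, pvW, hp, hz']
  | (n + 2) =>
    -- run length ≥ 3: the first window (p,c,c,c) is false since b = q
    have habs := pvW_absorb (some c) (z :: zs) (n + 2)
    rw [List.replicate_succ, List.replicate_succ] at habs
    rw [show List.replicate (n + 2 + 1) (some c)
          = some c :: some c :: some c :: List.replicate n (some c) by
          simp [List.replicate_succ]]
    simp only [List.cons_append, pvW] at habs ⊢
    simp [habs]

theorem pvW_eq_runs (rest : List Char) : ∀ (c : Char) (k : Nat) (p : Option Char),
    p ≠ some c →
    pvW (p :: List.replicate (k + 1) (some c) ++ rest.map some ++ [none])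
      = (pvRuns c (k + 1) rest).any (fun q => q.2 == 2) := by
  induction rest with
  | nil =>
    intro c k p hp
    have h := pvW_peel p c hp none (by simp) [] k
    simpa [pvRuns, pvW] using h
  | cons x xs ih =>
    intro c k p hp
    by_cases hx : x = c
    · subst hx
      have h2 := ih x (k + 1) p hp
      rw [show p :: List.replicate (k + 1) (some x) ++ (x :: xs).map some ++ [none]
            = p :: List.replicate (k + 1 + 1) (some x) ++ xs.map some ++ [none] by
            simp [List.replicate_succ' (n := k + 1), List.append_assoc]]
      rw [h2]
      simp [pvRuns]
    · have hpeel := pvW_peel p c hp (some x) (by intro h; exact hx (Option.some.inj h))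
        (xs.map some ++ [none]) k
      have hih := ih x 0 (some c) (by intro h; exact hx (Option.some.inj h).symm)
      simp only [Nat.zero_add, List.replicate_one, List.cons_append, List.map_cons,
        List.append_assoc, List.singleton_append, List.nil_append] at hpeel hih ⊢
      rw [hpeel, hih]
      simp [pvRuns, hx]

-- ===== VERDICT (by name: the statement is the Claim_ definition above) =====
theorem repeated_two_spec : Claim_equal_repeated_two := by
  intro s _ hpre
  unfold Spec_repeated_two repeated_two repeated_two_alt
  cases hs : s.toList with
  | nil =>
    exact absurd (String.toList_eq_nil_iff.mp hs) hpre
  | cons c rest =>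
    have h := pvW_eq_runs rest c 0 none (by simp)
    simp only [Nat.zero_add, List.replicate_one, List.singleton_append, List.cons_append] at h
    show pvLoopA c 1 rest = _
    rw [pvLoopA_eq_runs, ← h]
    simp
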